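-- pv_equiv track=rewrite | github.com/wonyeongJ/refiner | core/sql_formatter.py | _match_clause_at
-- ===== SOURCE A (Python) =====
-- def _match_clause_at(text_upper: str, start: int, clause: str) -> int | None:
--     """Match SQL clause allowing one-or-more spaces between words."""
--     n = len(text_upper)
--     words = clause.split(" ")
--     i = start
--
--     for idx, w in enumerate(words):
--         wlen = len(w)
--         if text_upper[i:i + wlen] != w:
--             return None
--         i += wlen
--
--         if idx < len(words) - 1:
--             if i >= n or text_upper[i] not in (" ", "\t", "\n", "\r"):
--                 return None
--             while i < n and text_upper[i] in (" ", "\t", "\n", "\r"):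
--                 i += 1
--
--     return i
-- ===== SOURCE B (Python) =====
-- WS = " \t\n\r"
--
--
-- def _match_clause_at(text_upper: str, start: int, clause: str) -> int | None:
--     """Single simultaneous scan of clause and text (no split into words):
--     a space in the clause demands a whitespace run in the text; any other
--     clause character is compared via a one-character slice peek."""
--     n = len(text_upper)
--     i = start
--     for c in clause:
--         if c == " ":
--             if i >= n or text_upper[i] not in WS:
--                 return None
--             while i < n and text_upper[i] in WS:
--                 i += 1
--         else:
--             if text_upper[i:i + 1] != c:
--                 return None
--             i += 1
--     return i
-- ===== Notes on version B (the rewrite author's own statement) =====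
-- stated objective: alternative
-- what changed: B replaces A's split-into-words loop with word-slice comparisons by a single simultaneous scan of the clause and the text: no word list is built, each clause space directly demands a whitespace run and every other clause character is matched by a one-character slice peek.
import Mathlib
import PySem

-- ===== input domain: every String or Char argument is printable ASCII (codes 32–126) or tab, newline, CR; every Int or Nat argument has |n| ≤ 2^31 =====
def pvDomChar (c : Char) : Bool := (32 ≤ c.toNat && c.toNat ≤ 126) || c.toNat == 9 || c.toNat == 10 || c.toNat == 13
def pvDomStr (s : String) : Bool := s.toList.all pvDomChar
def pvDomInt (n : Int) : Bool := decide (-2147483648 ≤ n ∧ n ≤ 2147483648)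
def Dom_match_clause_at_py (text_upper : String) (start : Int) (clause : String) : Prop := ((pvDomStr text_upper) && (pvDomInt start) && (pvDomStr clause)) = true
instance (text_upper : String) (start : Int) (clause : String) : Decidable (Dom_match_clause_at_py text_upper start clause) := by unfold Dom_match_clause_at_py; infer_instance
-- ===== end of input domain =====

-- B replaces A's split-into-words scan by a single simultaneous scan of clause and text (no word list);
-- equivalence is proved on all inputs where A returns (Pre_ excludes exactly the inputs where both Pythons raise).

-- the tuple (" ", "\t", "\n", "\r") used by both programs
def pvWS : List Char := [' ', '\t', '\n', '\r']

-- the 'while i < n and text_upper[i] in WS: i += 1' loop, literally identical in A and in B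
-- (text_upper[i] is PySem.List.pyGet?; its none case — Python's IndexError — is unreachable inside Pre_)
def pvSkipWs (t : List Char) (n : Int) (i : Int) : Int :=
  if _h : i < n then
    match PySem.List.pyGet? t i with
    | some c => if c ∈ pvWS then pvSkipWs t n (i + 1) else i
    | none => i
  else i
termination_by (n - i).toNat
decreasing_by omega

-- ===== PORT A =====
-- the 'for idx, w in enumerate(words)' loop; idx/total carry enumerate's index and len(words)
def pvALoop (t : List Char) (n : Int) (words : List (List Char)) (idx : Nat) (total : Nat) (i : Int) : Option Int :=
  match words with
  | [] => some i
  | w :: rest =>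
    -- if text_upper[i:i+wlen] != w: return None
    if PySem.List.slice t (some i) (some (i + (w.length : Int))) ≠ w then none
    else
      let i' := i + (w.length : Int)
      if idx < total - 1 then
        -- if i >= n or text_upper[i] not in WS: return None
        if i' ≥ n then none
        else
          match PySem.List.pyGet? t i' with
          | none => none      -- Python raises IndexError here (excluded by Pre_)
          | some c =>
            if c ∈ pvWS then pvALoop t n rest (idx + 1) total (pvSkipWs t n i')
            else none
      else pvALoop t n rest (idx + 1) total i'

def match_clause_at_py (text_upper : String) (start : Int) (clause : String) : Option Int :=
  let t := text_upper.toList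
  let n : Int := t.length
  let words := PySem.Chars.splitOn clause.toList [' ']   -- clause.split(" ")
  pvALoop t n words 0 words.length start

-- ===== PORT B =====
-- B's 'for c in clause' loop: a space in the clause demands a whitespace run, any other char is a one-char slice peek
def pvBLoop (t : List Char) (n : Int) (cs : List Char) (i : Int) : Option Int :=
  match cs with
  | [] => some i
  | c :: rest =>
    if c = ' ' then
      if i ≥ n then none
      else
        match PySem.List.pyGet? t i with
        | none => none      -- Python raises IndexError here (excluded by Pre_)
        | some d =>
          if d ∈ pvWS then pvBLoop t n rest (pvSkipWs t n i) else none
    else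
      -- if text_upper[i:i+1] != c: return None
      if PySem.List.slice t (some i) (some (i + 1)) = [c] then pvBLoop t n rest (i + 1)
      else none

def match_clause_at_py_alt (text_upper : String) (start : Int) (clause : String) : Option Int :=
  pvBLoop text_upper.toList (text_upper.toList.length : Int) clause.toList start

-- ===== PRECONDITION & SPEC =====
-- Pre_ excludes exactly the inputs on which Python A raises IndexError (start below -len(text_upper) while the
-- clause begins with a space); B raises the same IndexError on exactly those inputs, so no returning input is excluded.
def Pre_match_clause_at_py (text_upper : String) (start : Int) (clause : String) : Prop :=
  -(text_upper.toList.length : Int) ≤ start ∨ PySem.Str.startswith clause " " = false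

instance (text_upper : String) (start : Int) (clause : String) : Decidable (Pre_match_clause_at_py text_upper start clause) := by
  unfold Pre_match_clause_at_py; infer_instance

def pvWitness_match_clause_at_py : String × Int × String := ("SELECT  X", 0, "SELECT X")

def Spec_match_clause_at_py (text_upper : String) (start : Int) (clause : String) (out : Option Int) : Prop := out = match_clause_at_py_alt text_upper start clause
instance (text_upper : String) (start : Int) (clause : String) (out : Option Int) : Decidable (Spec_match_clause_at_py text_upper start clause out) := by unfold Spec_match_clause_at_py; infer_instance

-- ===== CLAIM (what is proved, stated in full; the proofs are below) =====
def Claim_equal_match_clause_at_py : Prop := ∀ (text_upper : String) (start : Int) (clause : String), Dom_match_clause_at_py text_upper start clause → Pre_match_clause_at_py text_upper start clause → Spec_match_clause_at_py text_upper start clause (match_clause_at_py text_upper start clause)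

-- ===== LEMMAS AND PROOFS =====

-- proof-side structural version of clause.split(" ") (bridged to PySem.Chars.splitOn below)
def pvSplitSp : List Char → List (List Char)
  | [] => [[]]
  | c :: r =>
    match pvSplitSp r with
    | [] => [[c]]          -- unreachable: pvSplitSp never returns []
    | p :: ps => if c = ' ' then [] :: p :: ps else (c :: p) :: ps

-- glue the split pieces back together with single spaces
def pvJoinSp : List (List Char) → List Char
  | [] => []
  | [w] => w
  | w :: r => w ++ ' ' :: pvJoinSp r

theorem pvSplitSp_ne_nil (s : List Char) : pvSplitSp s ≠ [] := by
  cases s with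
  | nil => simp [pvSplitSp]
  | cons c r =>
    simp only [pvSplitSp]
    cases h : pvSplitSp r with
    | nil => simp
    | cons p ps => by_cases hc : c = ' ' <;> simp [hc]

theorem pvSplitSp_no_space (s : List Char) : ∀ w ∈ pvSplitSp s, ' ' ∉ w := by
  induction s with
  | nil => simp [pvSplitSp]
  | cons c r ih =>
    simp only [pvSplitSp]
    cases h : pvSplitSp r with
    | nil => exact absurd h (pvSplitSp_ne_nil r)
    | cons p ps =>
      rw [h] at ih
      dsimp only
      intro w hw
      by_cases hc : c = ' '
      · rw [if_pos hc] at hw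
        rcases List.mem_cons.mp hw with rfl | hw2
        · simp
        · exact ih w hw2
      · rw [if_neg hc] at hw
        rcases List.mem_cons.mp hw with rfl | hw2
        · intro hm
          rcases List.mem_cons.mp hm with h1 | h1
          · exact hc h1.symm
          · exact ih p List.mem_cons_self h1
        · exact ih w (List.mem_cons_of_mem _ hw2)


theorem pvJoinSp_cons_cons (c : Char) (p : List Char) (ps : List (List Char)) :
    pvJoinSp ((c :: p) :: ps) = c :: pvJoinSp (p :: ps) := by
  cases ps <;> simp [pvJoinSp]

theorem pvJoinSp_splitSp (s : List Char) : pvJoinSp (pvSplitSp s) = s := by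
  induction s with
  | nil => simp [pvSplitSp, pvJoinSp]
  | cons c r ih =>
    simp only [pvSplitSp]
    cases h : pvSplitSp r with
    | nil => exact absurd h (pvSplitSp_ne_nil r)
    | cons p ps =>
      rw [h] at ih
      dsimp only
      by_cases hc : c = ' '
      · subst hc
        cases ps with
        | nil => simpa [pvJoinSp] using ih
        | cons q qs => simpa [pvJoinSp] using ih
      · simp only [if_neg hc]
        rw [pvJoinSp_cons_cons, ih]

-- bridge: PySem.Chars.splitOn with a single-space separator is pvSplitSp
theorem pvSplitOn_go_eq (l : List Char) : ∀ (fuel : Nat) (cur : List Char) (acc : List (List Char)),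
    l.length ≤ fuel →
    PySem.Chars.splitOn.go [' '] fuel l cur acc =
      acc.reverse ++ (match pvSplitSp l with
                      | [] => []          -- unreachable
                      | p :: ps => (cur.reverse ++ p) :: ps) := by
  induction l with
  | nil =>
    intro fuel cur acc _
    cases fuel <;> simp [PySem.Chars.splitOn.go, pvSplitSp]
  | cons c rest ih =>
    intro fuel cur acc hfuel
    cases fuel with
    | zero => simp at hfuel
    | succ f =>
      have hr : rest.length ≤ f := by simpa using hfuel
      by_cases hc : c = ' '
      · subst hc
        rw [show PySem.Chars.splitOn.go [' '] (f + 1) (' ' :: rest) cur acc =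
              PySem.Chars.splitOn.go [' '] f rest [] (cur.reverse :: acc) by
            simp [PySem.Chars.splitOn.go, List.isPrefixOf]]
        rw [ih f [] (cur.reverse :: acc) hr]
        simp only [pvSplitSp]
        rcases h : pvSplitSp rest with _ | ⟨p, ps⟩
        · exact absurd h (pvSplitSp_ne_nil rest)
        · simp
      · rw [show PySem.Chars.splitOn.go [' '] (f + 1) (c :: rest) cur acc =
              PySem.Chars.splitOn.go [' '] f rest (c :: cur) acc by
            simp [PySem.Chars.splitOn.go, List.isPrefixOf]
            intro h
            exact absurd h.symm hc]
        rw [ih f (c :: cur) acc hr]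
        simp only [pvSplitSp]
        rcases h : pvSplitSp rest with _ | ⟨p, ps⟩
        · exact absurd h (pvSplitSp_ne_nil rest)
        · simp [if_neg hc]

theorem pvSplitOn_eq (s : List Char) : PySem.Chars.splitOn s [' '] = pvSplitSp s := by
  rw [PySem.Chars.splitOn, pvSplitOn_go_eq s (s.length + 1) [] [] (by omega)]
  rcases h : pvSplitSp s with _ | ⟨p, ps⟩
  · exact absurd h (pvSplitSp_ne_nil s)
  · simp

-- arithmetic about Python's slice-index clamping used by the slice decomposition
theorem pvClampFacts (n : Nat) (i : Int) (k : Nat) :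
    PySem.List.clampIdx n (i + 1) ≤ PySem.List.clampIdx n i + 1 ∧
    PySem.List.clampIdx n (i + 1) ≤ n ∧
    (PySem.List.clampIdx n (i + 1) ≤ PySem.List.clampIdx n i →
      PySem.List.clampIdx n (i + ((k : Int) + 1)) - PySem.List.clampIdx n i < k + 1 ∨
      n - PySem.List.clampIdx n i < k + 1) ∧
    (PySem.List.clampIdx n (i + 1) = PySem.List.clampIdx n i + 1 →
      PySem.List.clampIdx n (i + ((k : Int) + 1)) ≤ PySem.List.clampIdx n i → 1 ≤ k) := by
  unfold PySem.List.clampIdx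
  split_ifs <;> simp <;> omega

-- one-character decomposition of a Python slice comparison: t[i:i+1+k] == c::w ↔ t[i:i+1] == [c] and t[i+1:i+1+k] == w
theorem pvSlice_cons (t : List Char) (i : Int) (c : Char) (w : List Char) :
    (PySem.List.slice t (some i) (some (i + ((w.length : Int) + 1))) = c :: w) ↔
      (PySem.List.slice t (some i) (some (i + 1)) = [c] ∧
       PySem.List.slice t (some (i + 1)) (some ((i + 1) + (w.length : Int))) = w) := by
  have harg : (i + 1) + (w.length : Int) = i + ((w.length : Int) + 1) := by ring
  rw [harg]
  obtain ⟨h2, h5, h6, h7⟩ := pvClampFacts t.length i w.length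
  simp only [PySem.List.slice]
  by_cases hflat : PySem.List.clampIdx t.length (i + 1) ≤ PySem.List.clampIdx t.length i
  · apply iff_of_false
    · intro he
      have hlen := congrArg List.length he
      simp only [List.length_take, List.length_drop, List.length_cons] at hlen
      rcases h6 hflat with h | h <;> omega
    · intro ⟨he, _⟩
      have hlen := congrArg List.length he
      simp only [List.length_take, List.length_drop, List.length_cons, List.length_nil] at hlen
      omega
  · have hstep : PySem.List.clampIdx t.length (i + 1) = PySem.List.clampIdx t.length i + 1 := by omega
    have haln : PySem.List.clampIdx t.length i < t.length := by omega
    have hdrop : t.drop (PySem.List.clampIdx t.length i) =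
        t[PySem.List.clampIdx t.length i] :: t.drop (PySem.List.clampIdx t.length i + 1) :=
      List.drop_eq_getElem_cons haln
    rw [hdrop, hstep]
    by_cases hb : PySem.List.clampIdx t.length (i + ((w.length : Int) + 1)) ≤ PySem.List.clampIdx t.length i
    · have hk := h7 hstep hb
      apply iff_of_false
      · have h0 : PySem.List.clampIdx t.length (i + ((w.length : Int) + 1)) - PySem.List.clampIdx t.length i = 0 := by omega
        rw [h0]
        simp
      · intro ⟨_, he⟩
        have h0 : PySem.List.clampIdx t.length (i + ((w.length : Int) + 1)) - (PySem.List.clampIdx t.length i + 1) = 0 := by omega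
        rw [h0] at he
        have := congrArg List.length he
        simp at this
        omega
    · have hba : PySem.List.clampIdx t.length (i + ((w.length : Int) + 1)) - PySem.List.clampIdx t.length i =
        (PySem.List.clampIdx t.length (i + ((w.length : Int) + 1)) - (PySem.List.clampIdx t.length i + 1)) + 1 := by omega
      rw [hba]
      simp only [Nat.add_sub_cancel_left, List.take_succ_cons, List.take_zero, List.cons.injEq, and_true]

-- B's loop eats a space-free word exactly like A's word-slice comparison
theorem pvBLoop_word (t : List Char) (n : Int) {w : List Char} (hw : ' ' ∉ w) : ∀ (cs : List Char) (i : Int),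
    pvBLoop t n (w ++ cs) i =
      if PySem.List.slice t (some i) (some (i + (w.length : Int))) = w then
        pvBLoop t n cs (i + (w.length : Int))
      else none := by
  induction w with
  | nil =>
    intro cs i
    have h0 : PySem.List.slice t (some i) (some (i + (([] : List Char).length : Int))) = [] := by
      simp [PySem.List.slice]
    rw [List.nil_append, if_pos h0]
    simp
  | cons c w' ih =>
    intro cs i
    have hc : ¬ c = ' ' := fun h => hw (h ▸ List.mem_cons_self)
    have hw' : ' ' ∉ w' := fun h => hw (List.mem_cons_of_mem _ h)
    have hlen : ((c :: w').length : Int) = (w'.length : Int) + 1 := by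
      simp
    rw [hlen]
    show (if c = ' ' then _ else _) = _
    rw [if_neg hc]
    simp only [List.append_eq]
    rw [ih hw' cs (i + 1)]
    by_cases h1 : PySem.List.slice t (some i) (some (i + 1)) = [c]
    · by_cases h2 : PySem.List.slice t (some (i + 1)) (some ((i + 1) + (w'.length : Int))) = w'
      · rw [if_pos h1, if_pos h2, if_pos ((pvSlice_cons t i c w').mpr ⟨h1, h2⟩)]
        have : i + 1 + (w'.length : Int) = i + ((w'.length : Int) + 1) := by ring
        rw [this]
      · rw [if_pos h1, if_neg h2, if_neg (fun h => h2 ((pvSlice_cons t i c w').mp h).2)]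
    · rw [if_neg h1, if_neg (fun h => h1 ((pvSlice_cons t i c w').mp h).1)]

-- main induction: A's word loop equals B's character loop on the joined clause
theorem pvLoop_eq (t : List Char) (n : Int) : ∀ (words : List (List Char)),
    (∀ w ∈ words, ' ' ∉ w) → ∀ (idx total : Nat), idx + words.length = total → ∀ i : Int,
    pvALoop t n words idx total i = pvBLoop t n (pvJoinSp words) i := by
  intro words
  induction words with
  | nil =>
    intro _ _ _ _ i
    simp [pvALoop, pvJoinSp, pvBLoop]
  | cons w rest ih =>
    intro hws idx total htot i
    have hw : ' ' ∉ w := hws w List.mem_cons_self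
    have hrest : ∀ v ∈ rest, ' ' ∉ v := fun v hv => hws v (List.mem_cons_of_mem _ hv)
    cases rest with
    | nil =>
      have hlast : ¬ idx < total - 1 := by simp at htot; omega
      rw [show pvJoinSp [w] = w ++ [] by simp [pvJoinSp]]
      rw [pvBLoop_word t n hw [] i]
      show (if PySem.List.slice t (some i) (some (i + (w.length : Int))) ≠ w then none
            else if idx < total - 1 then _ else pvALoop t n [] (idx + 1) total (i + (w.length : Int))) = _
      by_cases hP : PySem.List.slice t (some i) (some (i + (w.length : Int))) = w
      · rw [if_neg (by simpa using hP), if_neg hlast, if_pos hP]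
        simp [pvALoop, pvBLoop]
      · rw [if_pos (by simpa using hP), if_neg hP]
    | cons r rs =>
      have hmid : idx < total - 1 := by
        simp [List.length_cons] at htot; omega
      rw [show pvJoinSp (w :: r :: rs) = w ++ ' ' :: pvJoinSp (r :: rs) from rfl]
      rw [pvBLoop_word t n hw (' ' :: pvJoinSp (r :: rs)) i]
      by_cases hP : PySem.List.slice t (some i) (some (i + (w.length : Int))) = w
      · show (if _ ≠ _ then none else if idx < total - 1 then _ else _) = _
        rw [if_neg (by simpa using hP), if_pos hmid, if_pos hP]
        show _ = (if (' ' : Char) = ' ' then _ else _)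
        rw [if_pos rfl]
        by_cases hn : i + (w.length : Int) ≥ n
        · rw [if_pos hn, if_pos hn]
        · rw [if_neg hn, if_neg hn]
          cases hg : PySem.List.pyGet? t (i + (w.length : Int)) with
          | none => rfl
          | some d =>
            dsimp only
            by_cases hd : d ∈ pvWS
            · rw [if_pos hd, if_pos hd]
              exact ih hrest (idx + 1) total (by simp at htot ⊢; omega) _
            · rw [if_neg hd, if_neg hd]
      · show (if _ ≠ _ then none else _) = _
        rw [if_pos (by simpa using hP), if_neg hP]

-- ===== VERDICT (by name: the statement is the Claim_ definition above) =====
theorem match_clause_at_py_spec : Claim_equal_match_clause_at_py := by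
  intro tu start clause _ _
  unfold Spec_match_clause_at_py match_clause_at_py match_clause_at_py_alt
  rw [pvSplitOn_eq]
  rw [pvLoop_eq tu.toList _ _ (pvSplitSp_no_space clause.toList) 0 _ (by simp) start]
  rw [pvJoinSp_splitSp]
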